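-- pv_equiv track=rewrite | github.com/debbieuri/pictologic_try | pictologic.py | set_widthways
-- ===== SOURCE A (Python) =====
-- def set_widthways(level,r):
--     numbers = []
--     for a in range(len(level[0])):
--         numbers.append([])
--         temp = 0
--         for b in range(len(level)):
--             if level[b][a] == True:
--                 temp+=1
--             else:
--                 if temp != 0:
--                     numbers[a].append(temp)
--                 temp = 0
--         if temp != 0:
--             numbers[a].append(temp)
--         if numbers[a] == []:
--             numbers[a].append(temp)
--     if r:
--         for i in numbers:
--             i.reverse()
--     return numbers
-- ===== SOURCE B (Python) =====
-- def column_runs(col):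
--     # run lengths of the maximal blocks of True cells, by recursion on the column
--     if not col:
--         return []
--     first, rest = col[0], col[1:]
--     tail = column_runs(rest)
--     if first != True:
--         return tail
--     if rest and rest[0] == True:
--         return [tail[0] + 1] + tail[1:]
--     return [1] + tail
--
--
-- def set_widthways(level, r):
--     width = len(level[0])
--     columns = zip(*[row[:width] for row in level])
--     out = []
--     for col in columns:
--         runs = column_runs(list(col))
--         if not runs:
--             runs = [0]
--         out.append(runs[::-1] if r else runs)
--     return out
-- ===== Notes on version B (the rewrite author's own statement) =====
-- stated objective: alternative
-- what changed: A builds each column's clue with a stateful index double-loop (range over columns, range over rows, carrying a temp counter); B transposes the grid with zip(*rows) and extracts each column's run lengths by recursion (find first non-True cell, emit the run, recurse on the remainder).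
import Mathlib
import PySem

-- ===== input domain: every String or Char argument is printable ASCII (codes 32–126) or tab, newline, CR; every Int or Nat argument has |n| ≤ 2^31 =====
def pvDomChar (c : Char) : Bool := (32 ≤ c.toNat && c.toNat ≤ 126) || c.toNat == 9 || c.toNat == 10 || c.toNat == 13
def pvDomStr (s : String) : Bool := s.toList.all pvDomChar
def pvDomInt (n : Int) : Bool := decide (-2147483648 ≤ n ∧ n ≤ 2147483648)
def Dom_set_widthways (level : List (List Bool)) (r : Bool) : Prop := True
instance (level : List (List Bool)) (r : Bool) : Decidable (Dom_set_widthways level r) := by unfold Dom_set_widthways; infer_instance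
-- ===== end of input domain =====

-- B replaces A's stateful index double-loop by transpose-then-recursive run extraction (zip + recursion on each column); objective: alternative decomposition, same cost.
-- Where A raises IndexError (empty level, or a row shorter than the first row), behaviour is not claimed: those inputs are outside Pre_.


-- ===== PORT A =====
-- literal transliteration of A: outer loop over a ∈ range(len(level[0])), inner loop over
-- b ∈ range(len(level)) carrying (numbers[a], temp); the two trailing ifs; final in-place reverses.
-- list indexing is getD; inside Pre_ every index is in range, so this matches Python exactly.
def set_widthways (level : List (List Bool)) (r : Bool) : List (List Int) :=
  let numbers : List (List Int) :=
    (List.range (level.headD []).length).foldl (fun numbers a =>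
      let st : List Int × Int :=
        (List.range level.length).foldl (fun (st : List Int × Int) b =>
          if (level.getD b []).getD a false = true then (st.1, st.2 + 1)
          else (if st.2 ≠ 0 then st.1 ++ [st.2] else st.1, 0)) ([], 0)
      let runs := if st.2 ≠ 0 then st.1 ++ [st.2] else st.1
      let runs := if runs = [] then runs ++ [st.2] else runs
      numbers ++ [runs]) []
  if r then numbers.map List.reverse else numbers

-- ===== PORT B =====
-- zip(*rows) is a Python builtin, ported by its contract: columns indexed up to the
-- shortest row's length (empty when rows = [], since min? of [] gives none → 0)
def pyZip (rows : List (List Bool)) : List (List Bool) :=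
  (List.range ((rows.map List.length).min?.getD 0)).map
    (fun i => rows.map (fun row => row.getD i false))

-- column_runs, recursion on the column: tail[0] is read only when rest starts with True,
-- in which case column_runs(rest) is nonempty, so headD/tail are exact
def columnRuns : List Bool → List Int
  | [] => []
  | first :: rest =>
    let tail := columnRuns rest
    if first ≠ true then tail
    else if rest.headD false = true then (tail.headD 0 + 1) :: tail.tail
    else 1 :: tail

def set_widthways_alt (level : List (List Bool)) (r : Bool) : List (List Int) :=
  let width := (level.headD []).length
  let columns := pyZip (level.map (fun row => row.take width))  -- row[:width] with width ≥ 0 is take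
  columns.map (fun col =>
    let runs := columnRuns col
    let runs := if runs = [] then [(0 : Int)] else runs
    if r then runs.reverse else runs)

-- ===== PRECONDITION & SPEC =====
-- A raises IndexError on an empty level (level[0]) and whenever some row is shorter than the
-- first row (level[b][a]); exactly those inputs are excluded.
def Pre_set_widthways (level : List (List Bool)) (r : Bool) : Prop :=
  level ≠ [] ∧ ∀ row ∈ level, (level.headD []).length ≤ row.length
instance (level : List (List Bool)) (r : Bool) : Decidable (Pre_set_widthways level r) := by unfold Pre_set_widthways; infer_instance
def pvWitness_set_widthways : List (List Bool) × Bool := ([[true, false, true], [true, true, false]], true)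


def Spec_set_widthways (level : List (List Bool)) (r : Bool) (out : List (List Int)) : Prop := out = set_widthways_alt level r
instance (level : List (List Bool)) (r : Bool) (out : List (List Int)) : Decidable (Spec_set_widthways level r out) := by unfold Spec_set_widthways; infer_instance

-- ===== CLAIM (what is proved, stated in full; the proofs are below) =====
def Claim_equal_set_widthways : Prop := ∀ (level : List (List Bool)) (r : Bool), Dom_set_widthways level r → Pre_set_widthways level r → Spec_set_widthways level r (set_widthways level r)
-- ===== LEMMAS AND PROOFS =====

-- A's inner-loop step on one cell
def stepA (st : List Int × Int) (c : Bool) : List Int × Int :=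
  if c = true then (st.1, st.2 + 1) else (if st.2 ≠ 0 then st.1 ++ [st.2] else st.1, 0)

-- run lengths with a carried open run of length t
def rwc (t : Int) : List Bool → List Int
  | [] => if t ≠ 0 then [t] else []
  | true :: rest => rwc (t + 1) rest
  | false :: rest => (if t ≠ 0 then [t] else []) ++ rwc 0 rest

-- per-column result (shared shape of both ports' column value, before the reverse)
def colResult (col : List Bool) : List Int :=
  let rs := columnRuns col
  if rs = [] then [(0 : Int)] else rs

theorem foldl_range_getD {σ : Type} (g : σ → Bool → σ) :
    ∀ (l : List Bool) (init : σ),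
      (List.range l.length).foldl (fun st b => g st (l.getD b false)) init = l.foldl g init := by
  intro l
  induction l with
  | nil => intro init; simp
  | cons x xs ih =>
    intro init
    simp only [List.length_cons, List.range_succ_eq_map, List.foldl_cons, List.foldl_map,
      List.getD_cons_zero, List.getD_cons_succ]
    exact ih (g init x)

theorem getD_map_getD (a : Nat) :
    ∀ (L : List (List Bool)) (b : Nat),
      (L.map (fun row => row.getD a false)).getD b false = (L.getD b []).getD a false := by
  intro L
  induction L with
  | nil => intro b; simp
  | cons x xs ih =>
    intro b
    cases b with
    | zero => simp
    | succ b => simpa using ih b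

theorem rwc_spec : ∀ (col : List Bool) (acc : List Int) (t : Int),
    (let st := col.foldl stepA (acc, t);
     if st.2 ≠ 0 then st.1 ++ [st.2] else st.1) = acc ++ rwc t col := by
  intro col
  induction col with
  | nil => intro acc t; by_cases h : t = 0 <;> simp [rwc, h]
  | cons c rest ih =>
    intro acc t
    cases c with
    | true => simpa [stepA, rwc] using ih acc (t + 1)
    | false =>
      by_cases h : t = 0 <;> simp [stepA, rwc, h, ih]

theorem foldl_min_all (w : Nat) : ∀ (xs : List Nat), (∀ x ∈ xs, x = w) → xs.foldl min w = w := by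
  intro xs
  induction xs with
  | nil => intro _; rfl
  | cons x xs ih =>
    intro h
    have hx : x = w := h x (by simp)
    simp only [List.foldl_cons, hx, min_self]
    exact ih (fun y hy => h y (by simp [hy]))

theorem min?_all_eq (w : Nat) : ∀ (l : List Nat), l ≠ [] → (∀ x ∈ l, x = w) → l.min? = some w := by
  intro l hne h
  cases l with
  | nil => exact absurd rfl hne
  | cons x xs =>
    have hx : x = w := h x (by simp)
    rw [List.min?_cons', hx, foldl_min_all w xs (fun y hy => h y (by simp [hy]))]

theorem columnRuns_false (rest : List Bool) : columnRuns (false :: rest) = columnRuns rest := by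
  rw [columnRuns]; simp

theorem columnRuns_true (rest : List Bool) :
    columnRuns (true :: rest) =
      (if rest.headD false = true then ((columnRuns rest).headD 0 + 1) :: (columnRuns rest).tail
       else 1 :: columnRuns rest) := by
  rw [columnRuns]; simp

theorem columnRuns_eq_rwc_both : ∀ (col : List Bool),
    columnRuns col = rwc 0 col ∧
      (∀ t : Int, 0 < t → rwc t col =
        (if col.headD false = true then (t + (columnRuns col).headD 0) :: (columnRuns col).tail
         else t :: columnRuns col)) := by
  intro col
  induction col with
  | nil =>
    refine ⟨rfl, ?_⟩
    intro t ht
    simp [rwc, show t ≠ 0 by omega, columnRuns]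
  | cons c rest ih =>
    obtain ⟨ih1, ih2⟩ := ih
    cases c with
    | false =>
      constructor
      · simpa [columnRuns_false, rwc] using ih1
      · intro t ht
        simp [columnRuns_false, rwc, show t ≠ 0 by omega, ih1]
    | true =>
      constructor
      · have e1 : rwc 0 (true :: rest) = rwc 1 rest := by simp [rwc]
        rw [e1, ih2 1 (by omega), columnRuns_true]
        cases hr : rest.headD false with
        | false => simp [hr]
        | true => simp [hr, List.cons.injEq] <;> omega
      · intro t ht
        have e1 : rwc t (true :: rest) = rwc (t + 1) rest := by simp [rwc]
        rw [e1, ih2 (t + 1) (by omega), columnRuns_true]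
        cases hr : rest.headD false with
        | false => simp [hr]
        | true => simp [hr, List.cons.injEq] <;> omega

theorem columnRuns_eq_rwc (col : List Bool) : columnRuns col = rwc 0 col :=
  (columnRuns_eq_rwc_both col).1

theorem colA_eq (col : List Bool) :
    (let st := col.foldl stepA (([] : List Int), (0 : Int));
     let runs := if st.2 ≠ 0 then st.1 ++ [st.2] else st.1;
     if runs = [] then runs ++ [st.2] else runs) = colResult col := by
  have h := rwc_spec col [] 0
  simp only [List.nil_append] at h
  have hc : columnRuns col = rwc 0 col := columnRuns_eq_rwc col
  simp only [colResult, hc]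
  by_cases h2 : (col.foldl stepA (([] : List Int), (0 : Int))).2 = 0
  · simp only [h2, ne_eq, not_true_eq_false, if_false] at h ⊢
    rw [h]
    split <;> simp_all
  · simp only [ne_eq, h2, not_false_eq_true, if_true] at h ⊢
    have hne : rwc 0 col ≠ [] := by rw [← h]; simp
    rw [h]
    simp [hne]

theorem foldl_append_map {α β : Type} (f : α → β) :
    ∀ (l : List α) (init : List β),
      l.foldl (fun acc a => acc ++ [f a]) init = init ++ l.map f := by
  intro l
  induction l with
  | nil => intro init; simp
  | cons x xs ih => intro init; simp [ih]

theorem pyZip_eq (w : Nat) (L : List (List Bool)) (hne : L ≠ [])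
    (hlen : ∀ row ∈ L, row.length = w) :
    pyZip L = (List.range w).map (fun a => L.map (fun row => row.getD a false)) := by
  have hmin : (L.map List.length).min? = some w := by
    apply min?_all_eq
    · simpa using hne
    · intro x hx
      simp only [List.mem_map] at hx
      obtain ⟨row, hrow, rfl⟩ := hx
      exact hlen row hrow
  rw [pyZip, hmin]
  rfl

theorem colB_eq (r : Bool) (col : List Bool) :
    (let runs := columnRuns col;
     let runs := if runs = [] then [(0 : Int)] else runs;
     if r then runs.reverse else runs) = (if r then (colResult col).reverse else colResult col) := by
  simp [colResult]

theorem col_take_eq (level : List (List Bool)) (w : Nat) (a : Nat) (ha : a < w) :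
    level.map ((fun row => row.getD a false) ∘ (fun row => List.take w row))
      = level.map (fun row => row.getD a false) := by
  apply List.map_congr_left
  intro row _
  simp only [Function.comp]
  rw [List.getD_eq_getElem?_getD, List.getD_eq_getElem?_getD, List.getElem?_take, if_pos ha]

theorem inner_eq (level : List (List Bool)) (a : Nat) :
    (List.range level.length).foldl
      (fun (st : List Int × Int) b =>
        if (level.getD b []).getD a false = true then (st.1, st.2 + 1)
        else (if st.2 ≠ 0 then st.1 ++ [st.2] else st.1, 0)) ([], 0)
      = (level.map (fun row => row.getD a false)).foldl stepA ([], 0) := by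
  have hl : (level.map (fun row => row.getD a false)).length = level.length := by simp
  have hfun : (fun (st : List Int × Int) b =>
        if (level.getD b []).getD a false = true then (st.1, st.2 + 1)
        else (if st.2 ≠ 0 then st.1 ++ [st.2] else st.1, 0))
      = (fun (st : List Int × Int) b =>
          stepA st ((level.map (fun row => row.getD a false)).getD b false)) := by
    funext st b
    rw [stepA, getD_map_getD]
  rw [hfun, ← hl, foldl_range_getD]

-- ===== VERDICT (by name: the statement is the Claim_ definition above) =====
theorem set_widthways_spec : Claim_equal_set_widthways := by
  intro level r _ pre
  obtain ⟨hne, hlen⟩ := pre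
  unfold Spec_set_widthways
  have hw : ∀ row ∈ level.map (fun row => row.take (level.headD []).length),
      row.length = (level.headD []).length := by
    intro row hrow
    simp only [List.mem_map] at hrow
    obtain ⟨row0, h0, rfl⟩ := hrow
    have := hlen row0 h0
    simp only [List.length_take]
    omega
  have hzip := pyZip_eq (level.headD []).length
      (level.map (fun row => row.take (level.headD []).length)) (by simpa using hne) hw
  simp only [set_widthways, set_widthways_alt, hzip, List.map_map, inner_eq, colA_eq, colB_eq,
    foldl_append_map, List.nil_append]
  cases r
  · simp only [if_false, Bool.false_eq_true]
    apply List.map_congr_left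
    intro a ha
    simp only [Function.comp_apply, Function.comp]
    rw [col_take_eq level _ a (List.mem_range.mp ha)]
  · simp only [if_true, List.map_map]
    apply List.map_congr_left
    intro a ha
    simp only [Function.comp_apply, Function.comp]
    rw [col_take_eq level _ a (List.mem_range.mp ha)]
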